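-- pv_equiv track=rewrite | github.com/danielares/TwComp | myLibs/generate_api_data.py | count_polarity
-- ===== SOURCE A (Python) =====
-- def count_polarity(tweets):
--     positive = 0
--     neutral = 0
--     negative = 0
--
--     for tweet in tweets:
--         if tweet['tweet_analise'][0] == 'positivo':
--             positive += 1
--         elif tweet['tweet_analise'][0] == 'neutro':
--             neutral += 1
--         else:
--             negative += 1
--
--     return positive, neutral, negative
-- ===== SOURCE B (Python) =====
-- def count_polarity(tweets):
--     tags = [tweet['tweet_analise'][0] for tweet in tweets]
--     positive = tags.count('positivo')
--     neutral = tags.count('neutro')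
--     return positive, neutral, len(tags) - positive - neutral
-- ===== Notes on version B (the rewrite author's own statement) =====
-- stated objective: alternative
-- what changed: Replaces the single-pass if/elif/else counter loop with a branch-free staged computation: first project each tweet to its polarity tag, then count the two named tags with list.count and obtain the negative count by subtraction from the total length.
import Mathlib
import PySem

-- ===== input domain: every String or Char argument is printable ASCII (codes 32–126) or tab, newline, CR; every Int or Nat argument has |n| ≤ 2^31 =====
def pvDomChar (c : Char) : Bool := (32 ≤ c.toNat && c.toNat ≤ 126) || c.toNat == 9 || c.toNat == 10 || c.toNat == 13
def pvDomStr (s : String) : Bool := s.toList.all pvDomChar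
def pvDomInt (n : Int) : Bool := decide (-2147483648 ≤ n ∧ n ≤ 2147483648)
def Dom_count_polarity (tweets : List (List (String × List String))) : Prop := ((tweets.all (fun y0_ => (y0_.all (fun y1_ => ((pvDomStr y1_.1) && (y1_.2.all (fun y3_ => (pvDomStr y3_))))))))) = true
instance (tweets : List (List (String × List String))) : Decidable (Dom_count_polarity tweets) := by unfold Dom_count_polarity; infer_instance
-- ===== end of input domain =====

-- B projects tags once, counts the two named tags with list.count, and derives the
-- negative count by subtraction; equivalence is proved on inputs where every tweet
-- has a non-empty 'tweet_analise' entry.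

-- ===== PORT A =====
-- tweet['tweet_analise'][0]: first-match association-list lookup, then index 0
-- (the "" default is never read under Pre_count_polarity, which excludes the KeyError/IndexError inputs).
def pvFirstTag (tweet : List (String × List String)) : String :=
  match tweet.lookup "tweet_analise" with
  | some v => PySem.List.pyGetD v 0 ""
  | none => ""

def count_polarity (tweets : List (List (String × List String))) : Int × Int × Int :=
  tweets.foldl (fun (acc : Int × Int × Int) tweet =>
    if pvFirstTag tweet = "positivo" then (acc.1 + 1, acc.2.1, acc.2.2)
    else if pvFirstTag tweet = "neutro" then (acc.1, acc.2.1 + 1, acc.2.2)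
    else (acc.1, acc.2.1, acc.2.2 + 1)) (0, 0, 0)

-- ===== PORT B =====
def count_polarity_alt (tweets : List (List (String × List String))) : Int × Int × Int :=
  let tags := tweets.map pvFirstTag
  let positive : Int := PySem.List.count tags "positivo"
  let neutral : Int := PySem.List.count tags "neutro"
  (positive, neutral, PySem.List.len tags - positive - neutral)

-- ===== PRECONDITION & SPEC =====
-- Pre_ excludes exactly the inputs where A raises: a tweet missing the 'tweet_analise'
-- key (KeyError) or whose 'tweet_analise' list is empty (IndexError).
def Pre_count_polarity (tweets : List (List (String × List String))) : Prop :=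
  (tweets.all (fun t => match t.lookup "tweet_analise" with
    | some (_ :: _) => true
    | _ => false)) = true
instance (tweets : List (List (String × List String))) : Decidable (Pre_count_polarity tweets) := by unfold Pre_count_polarity; infer_instance

def pvWitness_count_polarity : (List (List (String × List String))) :=
  [[("tweet_analise", ["positivo"])], [("tweet_analise", ["negativo"])]]

def Spec_count_polarity (tweets : List (List (String × List String))) (out : Int × Int × Int) : Prop := out = count_polarity_alt tweets
instance (tweets : List (List (String × List String))) (out : Int × Int × Int) : Decidable (Spec_count_polarity tweets out) := by unfold Spec_count_polarity; infer_instance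

-- ===== CLAIM (what is proved, stated in full; the proofs are below) =====
def Claim_equal_count_polarity : Prop := ∀ (tweets : List (List (String × List String))), Dom_count_polarity tweets → Pre_count_polarity tweets → Spec_count_polarity tweets (count_polarity tweets)

-- ===== LEMMAS AND PROOFS =====

-- A's fold adds the per-category counts of the suffix to the accumulator.
lemma foldA_eq (tweets : List (List (String × List String))) (p n g : Int) :
    tweets.foldl (fun (acc : Int × Int × Int) tweet =>
      if pvFirstTag tweet = "positivo" then (acc.1 + 1, acc.2.1, acc.2.2)
      else if pvFirstTag tweet = "neutro" then (acc.1, acc.2.1 + 1, acc.2.2)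
      else (acc.1, acc.2.1, acc.2.2 + 1)) (p, n, g)
    = (p + (tweets.countP (fun t => pvFirstTag t = "positivo") : Int),
       n + (tweets.countP (fun t => pvFirstTag t = "neutro") : Int),
       g + (tweets.countP (fun t => pvFirstTag t ≠ "positivo" ∧ pvFirstTag t ≠ "neutro") : Int)) := by
  induction tweets generalizing p n g with
  | nil => simp
  | cons t ts ih =>
    by_cases hp : pvFirstTag t = "positivo"
    · simp [List.foldl_cons, hp, ih]; ring
    · by_cases hn : pvFirstTag t = "neutro"
      · simp [List.foldl_cons, hn, ih]; ring
      · simp [List.foldl_cons, hp, hn, ih]; ring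

-- the three categories partition the list
lemma count_partition (tweets : List (List (String × List String))) :
    tweets.countP (fun t => pvFirstTag t = "positivo")
    + tweets.countP (fun t => pvFirstTag t = "neutro")
    + tweets.countP (fun t => pvFirstTag t ≠ "positivo" ∧ pvFirstTag t ≠ "neutro")
    = tweets.length := by
  induction tweets with
  | nil => simp
  | cons t ts ih =>
    by_cases hp : pvFirstTag t = "positivo"
    · simp [hp] at ih ⊢; omega
    · by_cases hn : pvFirstTag t = "neutro"
      · simp [hn] at ih ⊢; omega
      · simp [hp, hn] at ih ⊢; omega

-- B's count of a tag in the projected list is the countP of tweets with that tag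
lemma count_map_tags (tweets : List (List (String × List String))) (s : String) :
    PySem.List.count (tweets.map pvFirstTag) s
    = tweets.countP (fun t => pvFirstTag t = s) := by
  rw [PySem.List.count_eq, List.count, List.countP_map]
  congr 1

-- ===== VERDICT (by name: the statement is the Claim_ definition above) =====
theorem count_polarity_spec : Claim_equal_count_polarity := by
  intro tweets _ _
  show count_polarity tweets = count_polarity_alt tweets
  unfold count_polarity count_polarity_alt
  dsimp only
  rw [foldA_eq, count_map_tags, count_map_tags]
  have h := count_partition tweets
  simp [PySem.List.len_eq] at h ⊢
  omega
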